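-- pv_equiv track=rewrite | github.com/SedatCeyhan/Algorithms_Solutions | Dynamic Programming/SquareSummable.py | squareSummable
-- ===== SOURCE A (Python) =====
-- import math
--
-- def squareSummable(n):
--     squares = []
--     for i in range(1, int(math.sqrt(n)) + 1):
--         squares.append(i ** 2)
--
--     dp = []
--     for m in range(len(squares) + 1):
--         dp.append([0] * (n + 1))
--         dp[m][0] = 1
--
--     square_summables = []
--     for b in range(1, n + 1):
--         for m in range(1, len(squares) + 1):
--             if b < squares[m - 1]:
--                 dp[m][b] = dp[m - 1][b]
--             else:
--                 dp[m][b] = max(dp[m - 1][b], dp[m - 1][b - squares[m - 1]])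
--
--         if dp[len(squares)][b] == 1:
--             square_summables.append(b)
--
--
--     return len(square_summables)
-- ===== SOURCE B (Python) =====
-- def squareSummable(n):
--     # Bitset subset-sum: bit b of mask is set iff b is a sum of distinct squares.
--     mask = 1
--     i = 1
--     while i * i <= n:
--         mask = (mask | (mask << (i * i))) & ((1 << (n + 1)) - 1)
--         i += 1
--     return (mask >> 1).bit_count()
-- ===== Notes on version B (the rewrite author's own statement) =====
-- stated objective: faster
-- what changed: Replaces the (sqrt(n)+1) x (n+1) 0/1 DP table and the collected list of summable values with a single big-integer bitset updated by mask |= mask << square, counting result bits with popcount.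
-- crash fix: On n < 0 A raises ValueError (math.sqrt of a negative number); B's while loop never runs and it returns 0. — e.g. on squareSummable(-1): A raises ValueError, B returns 0
import Mathlib
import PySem

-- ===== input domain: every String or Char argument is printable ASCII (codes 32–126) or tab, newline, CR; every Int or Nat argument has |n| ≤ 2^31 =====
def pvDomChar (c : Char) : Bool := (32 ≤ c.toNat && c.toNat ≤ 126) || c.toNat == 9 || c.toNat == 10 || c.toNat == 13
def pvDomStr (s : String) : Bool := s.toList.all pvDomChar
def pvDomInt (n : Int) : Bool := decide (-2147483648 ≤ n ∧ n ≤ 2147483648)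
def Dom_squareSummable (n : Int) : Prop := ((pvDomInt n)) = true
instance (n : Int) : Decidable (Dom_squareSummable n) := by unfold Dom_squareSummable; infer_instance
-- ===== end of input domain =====

-- B replaces A's (sqrt(n)+1) x (n+1) DP table with a big-integer bitset (mask |= mask << square)
-- and a popcount; return values only, neither program mutates anything observable.

-- ===== PORT A =====
-- dp is a Python list of lists, mutated in place and always indexed in range;
-- ported as Array (Array Nat) with these in-range get/set helpers.
def pvGet2 (dp : Array (Array Nat)) (m b : Nat) : Nat := (dp.getD m #[]).getD b 0
def pvSet2 (dp : Array (Array Nat)) (m b v : Nat) : Array (Array Nat) :=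
  let row := dp.getD m #[]
  -- release the row from dp first so the row update runs in place (value-equal to a direct update)
  let dp := dp.setIfInBounds m #[]
  dp.setIfInBounds m (row.setIfInBounds b v)

def squareSummable (n : Int) : Int :=
  -- Pre_ gives 0 ≤ n; int(math.sqrt(n)) equals Nat.sqrt n.toNat exactly for 0 ≤ n ≤ 2^31
  let N := n.toNat
  -- squares = []; for i in range(1, int(math.sqrt(n)) + 1): squares.append(i ** 2)
  let squares : List Nat := (List.range (Nat.sqrt N)).foldl (fun acc i => acc ++ [(i+1)^2]) []
  let M := squares.length
  -- dp = []; for m in range(len(squares)+1): dp.append([0]*(n+1)); dp[m][0] = 1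
  let dp0 : Array (Array Nat) :=
    (List.range (M+1)).foldl
      (fun dp _ => dp.push ((Array.replicate (N+1) 0).setIfInBounds 0 1)) #[]
  -- for b in range(1, n+1): inner loop over m, then collect b into square_summables
  let st := (List.range N).foldl (fun (st : Array (Array Nat) × List Nat) bi =>
      let b := bi + 1
      let dp := (List.range M).foldl (fun dp mi =>
          let m := mi + 1
          let sq := squares.getD (m-1) 0
          if b < sq then pvSet2 dp m b (pvGet2 dp (m-1) b)
          else pvSet2 dp m b (max (pvGet2 dp (m-1) b) (pvGet2 dp (m-1) (b - sq)))) st.1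
      if pvGet2 dp M b == 1 then (dp, st.2 ++ [b]) else (dp, st.2)) (dp0, [])
  (st.2.length : Int)

-- ===== PORT B =====
-- port of int.bit_count (popcount)
def pvPopCount (m : Nat) : Nat :=
  if m = 0 then 0 else m % 2 + pvPopCount (m / 2)

-- while i*i <= n: mask = (mask | (mask << i*i)) & ((1 << (n+1)) - 1); i += 1
def pvBitLoop (n : Int) (i mask : Nat) : Nat :=
  if (↑(i * i) : Int) ≤ n then
    pvBitLoop n (i+1) ((mask ||| (mask <<< (i*i))) &&& (2 ^ (n.toNat + 1) - 1))
  else mask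
termination_by n.toNat + 1 - i
decreasing_by
  rename_i h
  rcases Nat.eq_zero_or_pos i with h0 | h0
  · omega
  · have h1 : i ≤ i * i := Nat.le_mul_of_pos_left i h0
    omega

def squareSummable_alt (n : Int) : Int :=
  ((pvPopCount (pvBitLoop n 1 1 >>> 1) : Nat) : Int)

-- ===== PRECONDITION & SPEC =====
-- A raises ValueError (math.sqrt of a negative) for n < 0; Pre_ excludes exactly those inputs.
def Pre_squareSummable (n : Int) : Prop := 0 ≤ n
instance (n : Int) : Decidable (Pre_squareSummable n) := by unfold Pre_squareSummable; infer_instance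
def pvWitness_squareSummable : Int := 5

-- On n < 0, A raises ValueError (math.sqrt domain error); B's while loop never runs and it returns 0.
def Raises_squareSummable (n : Int) : Prop := n < 0
instance (n : Int) : Decidable (Raises_squareSummable n) := by unfold Raises_squareSummable; infer_instance
def pvRaiseWitness_squareSummable : Int := -1
def pvRaiseWitnessOut_squareSummable : Int := 0

def Spec_squareSummable (n : Int) (out : Int) : Prop := out = squareSummable_alt n
instance (n : Int) (out : Int) : Decidable (Spec_squareSummable n out) := by unfold Spec_squareSummable; infer_instance

-- ===== CLAIM (what is proved, stated in full; the proofs are below) =====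
def Claim_equal_squareSummable : Prop := ∀ (n : Int), Dom_squareSummable n → Pre_squareSummable n → Spec_squareSummable n (squareSummable n)
def Claim_raises_squareSummable : Prop := (∀ (n : Int), Dom_squareSummable n → Raises_squareSummable n → ¬ Pre_squareSummable n) ∧ (Dom_squareSummable (pvRaiseWitness_squareSummable) ∧ Raises_squareSummable (pvRaiseWitness_squareSummable) ∧ squareSummable_alt (pvRaiseWitness_squareSummable) = pvRaiseWitnessOut_squareSummable)

-- ===== LEMMAS AND PROOFS =====

-- list-level view of the dp array, used by the proofs
def pvGet2L (dp : List (List Nat)) (m b : Nat) : Nat := (dp.getD m []).getD b 0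
def pvSet2L (dp : List (List Nat)) (m b v : Nat) : List (List Nat) :=
  dp.set m ((dp.getD m []).set b v)
def pvToL (dp : Array (Array Nat)) : List (List Nat) := dp.toList.map Array.toList

theorem row_toL (dp : Array (Array Nat)) (m : Nat) :
    (pvToL dp).getD m [] = (dp.getD m #[]).toList := by
  rw [pvToL, List.getD_eq_getElem?_getD, Array.getD_eq_getD_getElem?, List.getElem?_map,
      ← Array.getElem?_toList]
  cases dp.toList[m]? <;> rfl

theorem get2_toL (dp : Array (Array Nat)) (m b : Nat) :
    pvGet2 dp m b = pvGet2L (pvToL dp) m b := by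
  rw [pvGet2, pvGet2L, row_toL, List.getD_eq_getElem?_getD, Array.getD_eq_getD_getElem?,
      Array.getElem?_toList]

theorem toL_set2 (dp : Array (Array Nat)) (m b v : Nat) :
    pvToL (pvSet2 dp m b v) = pvSet2L (pvToL dp) m b v := by
  have hrow := row_toL dp m
  simp only [pvSet2, pvSet2L, pvToL] at *
  rw [Array.toList_setIfInBounds, Array.toList_setIfInBounds, List.map_set, List.map_set,
      List.set_set, Array.toList_setIfInBounds, hrow]

theorem pair_ite (c : Bool) (dpA : Array (Array Nat)) (s : List Nat) (b : Nat) :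
    (if c then (pvToL dpA, s ++ [b]) else (pvToL dpA, s))
      = (pvToL (if c then (dpA, s ++ [b]) else (dpA, s)).1,
         (if c then (dpA, s ++ [b]) else (dpA, s)).2) := by
  cases c <;> rfl

-- pure model of one dp row update by square s
def pvStep (f : Nat → Nat) (s : Nat) : Nat → Nat :=
  fun b => if b < s then f b else max (f b) (f (b - s))

-- pure model of dp row m (first m squares processed)
def pvRow (L : List Nat) : Nat → Nat :=
  L.foldl pvStep (fun b => if b = 0 then 1 else 0)

-- the bitset step of B
def pvMStep (N : Nat) (mask s : Nat) : Nat := (mask ||| (mask <<< s)) &&& (2 ^ (N + 1) - 1)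

theorem foldl_app_singleton {α β : Type} (g : α → β) :
    ∀ (L : List α) (acc : List β), L.foldl (fun a x => a ++ [g x]) acc = acc ++ L.map g := by
  intro L
  induction L with
  | nil => simp
  | cons x xs ih => intro acc; simp [List.foldl_cons, ih]

theorem foldl_app_const {β : Type} (r : β) :
    ∀ (k : Nat) (acc : List β),
      (List.range k).foldl (fun a (_ : Nat) => a ++ [r]) acc = acc ++ List.replicate k r := by
  intro k
  induction k with
  | zero => simp
  | succ k ih =>
    intro acc
    rw [List.range_succ, List.foldl_append, ih acc]
    simp [List.replicate_succ']

-- generic invariant lemma for a fold over List.range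
theorem foldl_range_inv {α : Type} (P : Nat → α → Prop) (f : α → Nat → α) (M : Nat)
    (h : ∀ r a, r < M → P r a → P (r+1) (f a r)) (a0 : α) (h0 : P 0 a0) :
    P M ((List.range M).foldl f a0) := by
  induction M with
  | zero => simpa using h0
  | succ M ih =>
    rw [List.range_succ, List.foldl_append]
    simp only [List.foldl_cons, List.foldl_nil]
    exact h M _ (Nat.lt_succ_self M) (ih (fun r a hr => h r a (Nat.lt_succ_of_lt hr)))

theorem pvRow_zero : ∀ (L : List Nat) (f : Nat → Nat), f 0 = 1 →
    (L.foldl pvStep f) 0 = 1 := by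
  intro L
  induction L with
  | nil => intro f hf; simpa using hf
  | cons s L ih =>
    intro f hf
    simp only [List.foldl_cons]
    apply ih
    simp [pvStep, hf]

theorem pvRow_take_succ (L : List Nat) (mi : Nat) (h : mi < L.length) :
    pvRow (L.take (mi+1)) = pvStep (pvRow (L.take mi)) (L.getD mi 0) := by
  have htake : L.take (mi+1) = L.take mi ++ [L.getD mi 0] := by
    rw [List.getD_eq_getElem _ _ h, List.take_add_one, List.getElem?_eq_getElem h]
    rfl
  rw [pvRow, pvRow, htake, List.foldl_append]
  rfl

-- dp invariant: after outer columns 1..B and inner rows 1..r of column B+1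
def InvD (N : Nat) (L : List Nat) (dp : List (List Nat)) (B r : Nat) : Prop :=
  dp.length = L.length + 1 ∧
  (∀ m, m ≤ L.length → (dp.getD m []).length = N + 1) ∧
  (∀ m b, m ≤ L.length → b ≤ N →
    pvGet2L dp m b = if b ≤ B ∨ (b = B + 1 ∧ m ≤ r) then pvRow (L.take m) b else 0)

theorem pvGet2L_set_eq (dp : List (List Nat)) (m b v : Nat)
    (hm : m < dp.length) (hb : b < (dp.getD m []).length) :
    pvGet2L (pvSet2L dp m b v) m b = v := by
  simp only [pvGet2L, pvSet2L, List.getD_eq_getElem?_getD]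
  rw [List.getElem?_set_self (by omega)]
  simp only [Option.getD_some]
  rw [List.getElem?_set_self (by simpa [List.getD_eq_getElem?_getD] using hb)]
  simp

theorem pvGet2L_set_ne (dp : List (List Nat)) (m b v m' b' : Nat)
    (h : ¬ (m' = m ∧ b' = b)) :
    pvGet2L (pvSet2L dp m b v) m' b' = pvGet2L dp m' b' := by
  by_cases hm : m' = m
  · subst hm
    have hb : b' ≠ b := by tauto
    by_cases hmlt : m' < dp.length
    · simp only [pvGet2L, pvSet2L, List.getD_eq_getElem?_getD]
      rw [List.getElem?_set_self (by omega)]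
      simp only [Option.getD_some]
      rw [List.getElem?_set_ne (by omega)]
    · simp only [pvGet2L, pvSet2L]
      rw [List.set_eq_of_length_le (by omega)]
  · simp only [pvGet2L, pvSet2L, List.getD_eq_getElem?_getD]
    rw [List.getElem?_set_ne (by omega)]

theorem pvSet2L_length (dp : List (List Nat)) (m b v : Nat) :
    (pvSet2L dp m b v).length = dp.length := by simp [pvSet2L]

theorem pvSet2L_row_length (dp : List (List Nat)) (m b v m' : Nat) :
    ((pvSet2L dp m b v).getD m' []).length = (dp.getD m' []).length := by
  by_cases hm : m' = m
  · subst hm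
    by_cases hlt : m' < dp.length
    · simp only [pvSet2L, List.getD_eq_getElem?_getD]
      rw [List.getElem?_set_self (by omega)]
      simp
    · simp only [pvSet2L]
      rw [List.set_eq_of_length_le (by omega)]
  · simp only [pvSet2L, List.getD_eq_getElem?_getD]
    rw [List.getElem?_set_ne (by omega)]

-- setting the freshly computed cell preserves the invariant
theorem invD_set (N : Nat) (L : List Nat) (B : Nat) (dp : List (List Nat)) (mi : Nat)
    (hmi : mi < L.length) (hB : B + 1 ≤ N)
    (hlen : dp.length = L.length + 1)
    (hrow : ∀ m, m ≤ L.length → (dp.getD m []).length = N + 1)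
    (hval : ∀ m b, m ≤ L.length → b ≤ N →
      pvGet2L dp m b = if b ≤ B ∨ (b = B + 1 ∧ m ≤ mi) then pvRow (L.take m) b else 0) :
    InvD N L (pvSet2L dp (mi+1) (B+1) (pvRow (L.take (mi+1)) (B+1))) B (mi+1) := by
  have hm1 : mi + 1 < dp.length := by omega
  have hb1 : B + 1 < (dp.getD (mi+1) []).length := by rw [hrow (mi+1) (by omega)]; omega
  refine ⟨by rw [pvSet2L_length]; exact hlen, ?_, ?_⟩
  · intro m hm; rw [pvSet2L_row_length]; exact hrow m hm
  · intro m b hm hb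
    by_cases hc : m = mi + 1 ∧ b = B + 1
    · obtain ⟨rfl, rfl⟩ := hc
      rw [pvGet2L_set_eq dp _ _ _ hm1 hb1, if_pos (by right; omega)]
    · rw [pvGet2L_set_ne dp _ _ _ _ _ hc, hval m b hm hb]
      by_cases hz : b = B + 1 ∧ m = mi + 1
      · exact absurd ⟨hz.2, hz.1⟩ hc
      · exact if_congr (by omega) rfl rfl

-- one inner-loop step preserves the invariant
theorem inner_step (N : Nat) (L : List Nat) (hL : ∀ x ∈ L, 1 ≤ x) (B : Nat) (hB : B + 1 ≤ N)
    (dp : List (List Nat)) (mi : Nat) (hmi : mi < L.length) (h : InvD N L dp B mi) :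
    InvD N L
      (if B + 1 < L.getD (mi + 1 - 1) 0
       then pvSet2L dp (mi+1) (B+1) (pvGet2L dp (mi + 1 - 1) (B+1))
       else pvSet2L dp (mi+1) (B+1)
         (max (pvGet2L dp (mi + 1 - 1) (B+1)) (pvGet2L dp (mi + 1 - 1) (B+1 - L.getD (mi + 1 - 1) 0))))
      B (mi + 1) := by
  obtain ⟨hlen, hrow, hval⟩ := h
  simp only [Nat.add_sub_cancel]
  have hsqmem : L.getD mi 0 ∈ L := by
    rw [List.getD_eq_getElem _ _ hmi]; exact List.getElem_mem _
  have hsq1 : 1 ≤ L.getD mi 0 := hL _ hsqmem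
  have hv1 : pvGet2L dp mi (B+1) = pvRow (L.take mi) (B+1) := by
    rw [hval mi (B+1) (by omega) hB]
    simp
  have hv2 : pvGet2L dp mi (B+1 - L.getD mi 0) = pvRow (L.take mi) (B+1 - L.getD mi 0) := by
    rw [hval mi (B+1 - L.getD mi 0) (by omega) (by omega)]
    rw [if_pos (by left; omega)]
  have hstep := pvRow_take_succ L mi hmi
  by_cases hc : B + 1 < L.getD mi 0
  · rw [if_pos hc, hv1]
    have : pvRow (L.take mi) (B+1) = pvRow (L.take (mi+1)) (B+1) := by
      rw [hstep]; simp only [pvStep]; rw [if_pos hc]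
    rw [this]
    exact invD_set N L B dp mi hmi hB hlen hrow hval
  · rw [if_neg hc, hv1, hv2]
    have : max (pvRow (L.take mi) (B+1)) (pvRow (L.take mi) (B+1 - L.getD mi 0))
        = pvRow (L.take (mi+1)) (B+1) := by
      rw [hstep]; simp only [pvStep]; rw [if_neg hc]
    rw [this]
    exact invD_set N L B dp mi hmi hB hlen hrow hval

-- the full inner fold for column B+1
theorem inner_fold (N : Nat) (L : List Nat) (hL : ∀ x ∈ L, 1 ≤ x) (B : Nat) (hB : B + 1 ≤ N)
    (dp : List (List Nat)) (h : InvD N L dp B 0) :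
    InvD N L
      ((List.range L.length).foldl (fun dp mi =>
          if B + 1 < L.getD (mi + 1 - 1) 0
          then pvSet2L dp (mi+1) (B+1) (pvGet2L dp (mi + 1 - 1) (B+1))
          else pvSet2L dp (mi+1) (B+1)
            (max (pvGet2L dp (mi + 1 - 1) (B+1))
                 (pvGet2L dp (mi + 1 - 1) (B+1 - L.getD (mi + 1 - 1) 0)))) dp)
      B L.length :=
  foldl_range_inv (fun r dp => InvD N L dp B r) _ L.length
    (fun r a hr ha => inner_step N L hL B hB a r hr ha) dp h

-- shifting the invariant to the next column
theorem InvD_shift (N : Nat) (L : List Nat) (dp : List (List Nat)) (B : Nat)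
    (h : InvD N L dp B L.length) : InvD N L dp (B+1) 0 := by
  obtain ⟨h1, h2, h3⟩ := h
  refine ⟨h1, h2, ?_⟩
  intro m b hm hb
  rw [h3 m b hm hb]
  by_cases hz : b = B + 2 ∧ m = 0
  · obtain ⟨rfl, rfl⟩ := hz
    rw [if_neg (by omega), if_pos (by right; omega)]
    simp [pvRow]
  · exact if_congr (by omega) rfl rfl

-- row m = L.length is the final row
theorem pvGet2L_final (N : Nat) (L : List Nat) (dp : List (List Nat)) (B b : Nat)
    (hb : b ≤ N) (hbB : b ≤ B) (h : InvD N L dp B 0) :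
    pvGet2L dp L.length b = pvRow L b := by
  obtain ⟨_, _, h3⟩ := h
  rw [h3 L.length b (le_refl _) hb, if_pos (by left; exact hbB), List.take_length]

-- mask/row correspondence along the fold over the squares
theorem mask_fold_inv (N : Nat) :
    ∀ (L : List Nat) (f : Nat → Nat) (mask : Nat),
      (∀ b, b ≤ N → (mask.testBit b = (f b == 1))) →
      mask ≤ 2 ^ (N+1) - 1 →
      (∀ b, f b ≤ 1) →
      (∀ b, b ≤ N → ((L.foldl (pvMStep N) mask).testBit b = ((L.foldl pvStep f) b == 1))) ∧
      (L.foldl (pvMStep N) mask ≤ 2 ^ (N+1) - 1) ∧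
      (∀ b, (L.foldl pvStep f) b ≤ 1) := by
  intro L
  induction L with
  | nil => intro f mask h1 h2 h3; exact ⟨h1, h2, h3⟩
  | cons s L ih =>
    intro f mask h1 h2 h3
    simp only [List.foldl_cons]
    apply ih
    · intro b hb
      have e1 := h1 b hb
      have e2 := h1 (b - s) (by omega)
      have hlt : b < N + 1 := by omega
      simp only [pvMStep, pvStep, Nat.testBit_land, Nat.testBit_lor, Nat.testBit_shiftLeft,
        Nat.testBit_two_pow_sub_one, e1, e2]
      by_cases hbs : b < s
      · have hns : ¬ (b ≥ s) := by omega
        simp [hbs, hns, hlt]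
      · have hge : b ≥ s := by omega
        have hfb : f b = 0 ∨ f b = 1 := by have := h3 b; omega
        have hfs : f (b - s) = 0 ∨ f (b - s) = 1 := by have := h3 (b - s); omega
        rcases hfb with h' | h' <;> rcases hfs with h'' | h'' <;>
          simp [hbs, hge, hlt, h', h'']
    · exact Nat.and_le_right
    · intro b
      simp only [pvStep]
      split
      · exact h3 b
      · exact max_le (h3 b) (h3 _)

-- B's while loop is the fold of pvMStep over the squares
theorem bitloop_eq (n : Int) (hn : 0 ≤ n) :
    ∀ (k i mask : Nat), Nat.sqrt n.toNat + 1 - i = k →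
      pvBitLoop n i mask
        = ((List.range k).map (fun d => (i+d)*(i+d))).foldl (pvMStep n.toNat) mask := by
  intro k
  induction k with
  | zero =>
    intro i mask hk
    have hgt : Nat.sqrt n.toNat < i := by omega
    have : n.toNat < i * i := Nat.sqrt_lt.mp hgt
    rw [pvBitLoop, if_neg (by omega)]
    simp
  | succ k ih =>
    intro i mask hk
    have hle : i ≤ Nat.sqrt n.toNat := by omega
    have : i * i ≤ n.toNat := Nat.le_sqrt.mp hle
    rw [pvBitLoop, if_pos (by omega)]
    rw [ih (i+1) _ (by omega)]
    rw [List.range_succ_eq_map, List.map_cons, List.foldl_cons, List.map_map]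
    have hfun : ((fun d => (i+d)*(i+d)) ∘ Nat.succ) = (fun d => (i+1+d)*(i+1+d)) := by
      funext d
      have : i + Nat.succ d = i + 1 + d := by omega
      simp [Function.comp, this]
    rw [hfun]
    rfl

-- popcount counts the set bits below K
theorem pc_eq : ∀ (K m : Nat), m < 2 ^ K →
    pvPopCount m = (List.range K).countP (fun b => m.testBit b) := by
  intro K
  induction K with
  | zero =>
    intro m hm
    have : m = 0 := by omega
    subst this
    rw [pvPopCount]
    simp
  | succ K ih =>
    intro m hm
    by_cases h0 : m = 0
    · subst h0
      rw [pvPopCount]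
      simp [Nat.zero_testBit]
    · rw [pvPopCount, if_neg h0]
      have hpow : 2 ^ (K+1) = 2 ^ K * 2 := by rw [Nat.pow_succ]
      have hdiv : m / 2 < 2 ^ K := by omega
      rw [ih _ hdiv]
      rw [List.range_succ_eq_map, List.countP_cons, List.countP_map]
      have hcomp : ((fun b => m.testBit b) ∘ Nat.succ) = (fun b => (m / 2).testBit b) := by
        funext b
        simp [Function.comp, Nat.testBit_add_one]
      rw [hcomp, Nat.testBit_zero]
      have h2 : m % 2 = 0 ∨ m % 2 = 1 := by omega
      rcases h2 with h' | h' <;> simp [h'] <;> omega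

-- testBit of 1
theorem one_testBit (b : Nat) : Nat.testBit 1 b = decide (b = 0) := by
  cases b with
  | zero => simp
  | succ b => simp [Nat.testBit_add_one]

-- the initial dp row
theorem row0_getD (N b : Nat) :
    ((List.replicate (N+1) (0:Nat)).set 0 1).getD b 0 = if b = 0 then 1 else 0 := by
  cases b with
  | zero =>
    rw [List.getD_eq_getElem?_getD, List.getElem?_set_self (by simp)]
    simp
  | succ b =>
    rw [List.getD_eq_getElem?_getD, List.getElem?_set_ne (by omega)]
    by_cases hb : b + 1 < N + 1
    · rw [List.getElem?_eq_getElem (by simpa using hb)]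
      simp
    · rw [List.getElem?_eq_none (by simpa using hb)]
      simp

theorem invD_init (N : Nat) (L : List Nat) :
    InvD N L (List.replicate (L.length + 1) ((List.replicate (N+1) (0:Nat)).set 0 1)) 0 0 := by
  have hget : ∀ m, m ≤ L.length →
      (List.replicate (L.length + 1) ((List.replicate (N+1) (0:Nat)).set 0 1)).getD m []
        = (List.replicate (N+1) (0:Nat)).set 0 1 := by
    intro m hm
    rw [List.getD_eq_getElem?_getD, List.getElem?_replicate, if_pos (by omega)]
    rfl
  refine ⟨by simp, ?_, ?_⟩
  · intro m hm
    rw [hget m hm]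
    simp
  · intro m b hm hb
    have hrep : pvGet2L (List.replicate (L.length + 1) ((List.replicate (N+1) (0:Nat)).set 0 1)) m b
        = if b = 0 then 1 else 0 := by
      simp only [pvGet2L]
      rw [hget m hm]
      exact row0_getD N b
    rw [hrep]
    cases b with
    | zero =>
      rw [if_pos rfl, if_pos (by left; omega)]
      exact (pvRow_zero _ _ rfl).symm
    | succ b =>
      rw [if_neg (by omega)]
      by_cases hc : b + 1 ≤ 0 ∨ (b + 1 = 0 + 1 ∧ m ≤ 0)
      · rw [if_pos hc]
        have hb1 : b = 0 := by omega
        have hm0 : m = 0 := by omega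
        subst hb1; subst hm0
        simp [pvRow]
      · rw [if_neg hc]

-- characterisation of port A's result
theorem A_char (n : Int) (hn : 0 ≤ n) :
    squareSummable n
      = ((((List.range n.toNat).map (fun bi => bi + 1)).filter
          (fun b => pvRow ((List.range (Nat.sqrt n.toNat)).map (fun i => (i+1)^2)) b == 1)).length
         : Int) := by
  have hsq := foldl_app_singleton (fun i => (i+1)^2) (List.range (Nat.sqrt n.toNat)) []
  simp only [List.nil_append] at hsq
  set N := n.toNat with hN
  set L := (List.range (Nat.sqrt N)).map (fun i => (i+1)^2) with hLdef
  have hL : ∀ x ∈ L, 1 ≤ x := by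
    intro x hx
    rw [hLdef] at hx
    simp only [List.mem_map, List.mem_range] at hx
    obtain ⟨i, _, rfl⟩ := hx
    have : 0 < (i+1)^2 := by positivity
    omega
  -- the initial dp array, seen as a list of lists
  have hdp0 : pvToL ((List.range (L.length + 1)).foldl
      (fun dp _ => dp.push ((Array.replicate (N+1) 0).setIfInBounds 0 1)) #[])
      = List.replicate (L.length + 1) ((List.replicate (N+1) (0:Nat)).set 0 1) := by
    have h1 := List.foldl_hom (l := List.range (L.length + 1))
      (init := (#[] : Array (Array Nat))) pvToL
      (g₁ := fun dp _ => dp.push ((Array.replicate (N+1) 0).setIfInBounds 0 1))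
      (g₂ := fun dp (_ : Nat) => dp ++ [((List.replicate (N+1) (0:Nat)).set 0 1)])
      (by
        intro x y
        simp [pvToL, Array.toList_push, Array.toList_setIfInBounds, Array.toList_replicate])
    rw [← h1, foldl_app_const ((List.replicate (N+1) (0:Nat)).set 0 1) (L.length + 1) (pvToL #[])]
    simp [pvToL]
  -- the inner (row) loop commutes with the list view
  have hinner : ∀ (b : Nat) (dpA : Array (Array Nat)),
      (List.range L.length).foldl (fun dp mi =>
          if b < L.getD (mi + 1 - 1) 0
          then pvSet2L dp (mi+1) b (pvGet2L dp (mi + 1 - 1) b)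
          else pvSet2L dp (mi+1) b
            (max (pvGet2L dp (mi + 1 - 1) b) (pvGet2L dp (mi + 1 - 1) (b - L.getD (mi + 1 - 1) 0))))
        (pvToL dpA)
      = pvToL ((List.range L.length).foldl (fun dp mi =>
          if b < L.getD (mi + 1 - 1) 0
          then pvSet2 dp (mi+1) b (pvGet2 dp (mi + 1 - 1) b)
          else pvSet2 dp (mi+1) b
            (max (pvGet2 dp (mi + 1 - 1) b) (pvGet2 dp (mi + 1 - 1) (b - L.getD (mi + 1 - 1) 0)))) dpA) := by
    intro b dpA
    refine List.foldl_hom pvToL ?_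
    intro dp mi
    simp only [apply_ite pvToL, toL_set2, get2_toL]
  -- the outer loop commutes with the list view
  have hfold := List.foldl_hom (l := List.range N)
    (init := (((List.range (L.length + 1)).foldl
        (fun dp _ => dp.push ((Array.replicate (N+1) 0).setIfInBounds 0 1)) #[]), ([] : List Nat)))
    (fun st : Array (Array Nat) × List Nat => (pvToL st.1, st.2))
    (g₁ := fun (st : Array (Array Nat) × List Nat) bi =>
      let b := bi + 1
      let dp := (List.range L.length).foldl (fun dp mi =>
          let m := mi + 1
          let sq := L.getD (m-1) 0
          if b < sq then pvSet2 dp m b (pvGet2 dp (m-1) b)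
          else pvSet2 dp m b (max (pvGet2 dp (m-1) b) (pvGet2 dp (m-1) (b - sq)))) st.1
      if pvGet2 dp L.length b == 1 then (dp, st.2 ++ [b]) else (dp, st.2))
    (g₂ := fun (st : List (List Nat) × List Nat) bi =>
      let b := bi + 1
      let dp := (List.range L.length).foldl (fun dp mi =>
          let m := mi + 1
          let sq := L.getD (m-1) 0
          if b < sq then pvSet2L dp m b (pvGet2L dp (m-1) b)
          else pvSet2L dp m b (max (pvGet2L dp (m-1) b) (pvGet2L dp (m-1) (b - sq)))) st.1
      if pvGet2L dp L.length b == 1 then (dp, st.2 ++ [b]) else (dp, st.2))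
    (by
      intro st bi
      simp only []
      rw [hinner (bi + 1) st.1, ← get2_toL]
      exact pair_ite _ _ _ _)
  simp only [] at hfold
  rw [hdp0] at hfold
  have main := foldl_range_inv
    (fun B (st : List (List Nat) × List Nat) =>
      InvD N L st.1 B 0 ∧
      st.2 = ((List.range B).map (fun bi => bi + 1)).filter (fun b => pvRow L b == 1))
    (fun st bi =>
      let b := bi + 1
      let dp := (List.range L.length).foldl (fun dp mi =>
          let m := mi + 1
          let sq := L.getD (m-1) 0
          if b < sq then pvSet2L dp m b (pvGet2L dp (m-1) b)
          else pvSet2L dp m b (max (pvGet2L dp (m-1) b) (pvGet2L dp (m-1) (b - sq)))) st.1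
      if pvGet2L dp L.length b == 1 then (dp, st.2 ++ [b]) else (dp, st.2))
    N
    (by
      intro B st hB hP
      obtain ⟨hInv, hsums⟩ := hP
      simp only []
      have hIF := inner_fold N L hL B (by omega) st.1 hInv
      set dp' := (List.range L.length).foldl (fun dp mi =>
          if B + 1 < L.getD (mi + 1 - 1) 0
          then pvSet2L dp (mi+1) (B+1) (pvGet2L dp (mi + 1 - 1) (B+1))
          else pvSet2L dp (mi+1) (B+1)
            (max (pvGet2L dp (mi + 1 - 1) (B+1))
                 (pvGet2L dp (mi + 1 - 1) (B+1 - L.getD (mi + 1 - 1) 0)))) st.1 with hdp'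
      have hInv' : InvD N L dp' (B+1) 0 := InvD_shift N L dp' B hIF
      have hfin : pvGet2L dp' L.length (B+1) = pvRow L (B+1) :=
        pvGet2L_final N L dp' (B+1) (B+1) (by omega) (le_refl _) hInv'
      rw [hfin, hsums]
      have hrange : ((List.range (B+1)).map (fun bi => bi + 1))
          = ((List.range B).map (fun bi => bi + 1)) ++ [B+1] := by
        rw [List.range_succ, List.map_append]
        rfl
      rw [hrange, List.filter_append]
      by_cases hone : pvRow L (B+1) == 1
      · rw [if_pos hone]
        refine ⟨hInv', ?_⟩
        simp [List.filter, hone]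
      · rw [if_neg hone]
        refine ⟨hInv', ?_⟩
        simp [List.filter, hone])
    (List.replicate (L.length + 1) ((List.replicate (N+1) (0:Nat)).set 0 1), [])
    (⟨invD_init N L, by simp⟩)
  unfold squareSummable
  simp only [← hN, hsq]
  have hsnd := congrArg Prod.snd hfold
  simp only [] at hsnd
  exact congrArg (fun (l : List Nat) => (l.length : Int)) (hsnd.symm.trans main.2)

-- characterisation of port B's result
theorem B_char (n : Int) (hn : 0 ≤ n) :
    squareSummable_alt n
      = (((List.range n.toNat).countP
          (fun b => pvRow ((List.range (Nat.sqrt n.toNat)).map (fun i => (i+1)^2)) (b+1) == 1))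
         : Int) := by
  set L := (List.range (Nat.sqrt n.toNat)).map (fun i => (i+1)^2) with hLdef
  have hmask : pvBitLoop n 1 1 = L.foldl (pvMStep n.toNat) 1 := by
    rw [bitloop_eq n hn (Nat.sqrt n.toNat) 1 1 (by omega)]
    congr 1
    rw [hLdef]
    apply List.map_congr_left
    intro d _
    ring
  have hinv := mask_fold_inv n.toNat L (fun b => if b = 0 then 1 else 0) 1
    (by
      intro b hb
      rw [one_testBit]
      cases b with
      | zero => simp
      | succ b => simp)
    (by
      have : 2 ≤ 2 ^ (n.toNat+1) := by
        calc 2 = 2 ^ 1 := rfl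
        _ ≤ 2 ^ (n.toNat+1) := Nat.pow_le_pow_right (by omega) (by omega)
      omega)
    (by intro b; dsimp only; split <;> omega)
  obtain ⟨hbit, hle, _⟩ := hinv
  rw [← pvRow] at hbit
  have hpow : 2 ^ (n.toNat+1) = 2 * 2 ^ n.toNat := by ring
  have hdivlt : (L.foldl (pvMStep n.toNat) 1) >>> 1 < 2 ^ n.toNat := by
    rw [Nat.shiftRight_eq_div_pow, pow_one]
    have hlt : L.foldl (pvMStep n.toNat) 1 < 2 ^ n.toNat * 2 := by
      rw [hpow] at hle
      have h1 : 1 ≤ 2 ^ n.toNat := Nat.one_le_two_pow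
      omega
    exact (Nat.div_lt_iff_lt_mul (by omega)).mpr hlt
  unfold squareSummable_alt
  rw [hmask, pc_eq n.toNat _ hdivlt]
  congr 1
  apply List.countP_congr
  intro b hb
  simp only [List.mem_range] at hb
  rw [Nat.testBit_shiftRight, Nat.add_comm 1 b, hbit (b+1) (by omega)]

-- ===== VERDICT (by name: the statement is the Claim_ definition above) =====
theorem squareSummable_spec : Claim_equal_squareSummable := by
  intro n hdom hpre
  unfold Spec_squareSummable
  have hn : 0 ≤ n := hpre
  rw [A_char n hn, B_char n hn]
  congr 1
  rw [← List.countP_eq_length_filter, List.countP_map]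
  rfl

@[simp]
theorem squareSummable_raises : Claim_raises_squareSummable := by
  unfold Claim_raises_squareSummable
  constructor
  · intro n _ hr hp
    unfold Pre_squareSummable at hp
    unfold Raises_squareSummable at hr
    omega
  · refine ⟨by decide, by decide, ?_⟩
    have h1 : pvBitLoop (-1) 1 1 = 1 := by rw [pvBitLoop]; norm_num
    have h2 : pvPopCount 0 = 0 := by rw [pvPopCount]; rfl
    show squareSummable_alt (-1) = 0
    unfold squareSummable_alt
    rw [h1]
    have h3 : (1:Nat) >>> 1 = 0 := rfl
    rw [h3, h2]
    rfl
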